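-- pv_equiv track=rewrite | github.com/GeorgyDanilov10/my_practice | My_tasks/Module17/05_reversal/main.py | sort_line
-- ===== SOURCE A (Python) =====
-- def sort_line(line):
--     """sort_line
--
--     Args:
--         line (str): text
--
--     Returns:
--         str: text
--     """
--     length = len(line)
--     save1 = 0
--     save2 = 0
--     for step in range(1, length + 1):
--         if line[-step] == 'h':
--             save1 = length - step - 1
--             break
--     for step in range(length):
--         if line[step] == 'h':
--             save2 = step
--             break
--     return line[save1:save2: -1]
-- ===== SOURCE B (Python) =====
-- def sort_line(line):
--     """sort_line
--
--     Args:
--         line (str): text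
--
--     Returns:
--         str: text
--     """
--     parts = line.split('h')
--     return 'h'.join(parts[1:-1])[::-1]
-- ===== Notes on version B (the rewrite author's own statement) =====
-- stated objective: simpler
-- what changed: Replaces the two index-hunting loops and the negative-step three-argument slice by split('h'), dropping the outer segments and rejoining the interior, then reversing; no index arithmetic at all, and the character scanning moves into the C-level str.split/str.join.
-- intended difference: On strings of length >= 2 whose only 'h' is the first character, A's save1 becomes -1 and wraps to the last index, so A returns the whole tail reversed (e.g. 'hab' -> 'ba'), while B returns the empty string as intended, since there is no text strictly between a first and a last 'h'. — e.g. on sort_line("hab"): A returns "ba", B returns ""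
import Mathlib
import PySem

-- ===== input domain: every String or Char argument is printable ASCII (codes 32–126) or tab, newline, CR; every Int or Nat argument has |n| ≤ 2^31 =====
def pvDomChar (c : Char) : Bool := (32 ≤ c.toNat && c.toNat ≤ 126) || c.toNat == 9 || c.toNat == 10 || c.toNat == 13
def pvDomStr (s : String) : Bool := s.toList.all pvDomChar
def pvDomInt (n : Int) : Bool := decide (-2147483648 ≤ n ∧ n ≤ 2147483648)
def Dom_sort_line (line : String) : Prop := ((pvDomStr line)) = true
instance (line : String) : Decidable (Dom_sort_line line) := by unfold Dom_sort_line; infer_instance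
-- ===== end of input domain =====

-- B replaces A's two index-hunting loops + negative-step slice by split('h') / rejoin / reverse (objective: simpler);
-- on strings whose only 'h' is the first character A's save1 = -1 wraps around, stated as the intended difference D_ below.

-- ===== PORT A =====
-- first for-loop of A: for step in range(1, length+1): if line[-step]=='h': save1 = length-step-1; break
def sortLineLoopLast (cs : List Char) (steps : List Int) (save1 : Int) : Int :=
  match steps with
  | [] => save1
  | step :: rest =>
    if PySem.List.pyGet? cs (-step) = some 'h' then (cs.length : Int) - step - 1
    else sortLineLoopLast cs rest save1

-- second for-loop of A: for step in range(length): if line[step]=='h': save2 = step; break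
def sortLineLoopFirst (cs : List Char) (steps : List Int) (save2 : Int) : Int :=
  match steps with
  | [] => save2
  | step :: rest =>
    if PySem.List.pyGet? cs step = some 'h' then step
    else sortLineLoopFirst cs rest save2

def sort_line (line : String) : String :=
  let cs := line.toList
  let length : Int := (cs.length : Int)
  let save1 := sortLineLoopLast cs (PySem.List.pyRange 1 (length + 1)) 0
  let save2 := sortLineLoopFirst cs (PySem.List.pyRange 0 length) 0
  -- line[save1:save2:-1]; the step is -1 ≠ 0, so slice? is always `some`
  String.ofList ((PySem.List.slice? cs (some save1) (some save2) (-1)).getD [])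

-- ===== PORT B =====
def sort_line_alt (line : String) : String :=
  -- parts = line.split('h')
  let parts := PySem.Chars.splitOn line.toList ['h']
  -- 'h'.join(parts[1:-1])[::-1]   (a full [::-1] slice is exactly List.reverse)
  String.ofList (PySem.Chars.join ['h'] (PySem.List.slice parts (some 1) (some (-1)))).reverse

-- ===== PRECONDITION & SPEC =====
-- On strings of length >= 2 whose only 'h' is the first character, A's save1 becomes -1 and wraps to the
-- last index, so A returns the whole tail reversed (e.g. 'hab' -> 'ba'), while B returns '' as intended,
-- since there is no text strictly between a first and a last 'h'.
def D_sort_line (line : String) : Prop :=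
  2 ≤ line.toList.length ∧ line.toList.head? = some 'h' ∧ 'h' ∉ line.toList.tail
instance (line : String) : Decidable (D_sort_line line) := by unfold D_sort_line; infer_instance

def Spec_sort_line (line : String) (out : String) : Prop := ¬ D_sort_line line → out = sort_line_alt line
instance (line : String) (out : String) : Decidable (Spec_sort_line line out) := by unfold Spec_sort_line; infer_instance

def pvDiffWitness_sort_line : String := "hab"
def pvDiffWitnessOut_sort_line : String × String := ("ba", "")

-- ===== CLAIM (what is proved, stated in full; the proofs are below) =====
def Claim_unchanged_sort_line : Prop := ∀ (line : String), Dom_sort_line line → Spec_sort_line line (sort_line line)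
def Claim_changed_sort_line : Prop := Dom_sort_line (pvDiffWitness_sort_line) ∧ D_sort_line (pvDiffWitness_sort_line) ∧ sort_line (pvDiffWitness_sort_line) = pvDiffWitnessOut_sort_line.1 ∧ sort_line_alt (pvDiffWitness_sort_line) = pvDiffWitnessOut_sort_line.2 ∧ pvDiffWitnessOut_sort_line.1 ≠ pvDiffWitnessOut_sort_line.2
def Claim_exact_sort_line : Prop := ∀ (line : String), Dom_sort_line line → D_sort_line line → sort_line line ≠ sort_line_alt line

-- ===== LEMMAS AND PROOFS =====

-- ---- generalities ----

theorem first_h_split (cs : List Char) (h : 'h' ∈ cs) :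
    ∃ p q, cs = p ++ 'h' :: q ∧ 'h' ∉ p := by
  induction cs with
  | nil => cases h
  | cons c rest ih =>
    by_cases hc : c = 'h'
    · exact ⟨[], rest, by simp [hc], by simp⟩
    · have : 'h' ∈ rest := by
        rcases List.mem_cons.mp h with h1 | h1
        · exact absurd h1.symm hc
        · exact h1
      obtain ⟨p, q, hpq, hp⟩ := ih this
      refine ⟨c :: p, q, by simp [hpq], ?_⟩
      simp only [List.mem_cons, not_or]
      exact ⟨fun h => hc h.symm, hp⟩

theorem last_h_split (cs : List Char) (h : 'h' ∈ cs) :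
    ∃ m t, cs = m ++ 'h' :: t ∧ 'h' ∉ t := by
  obtain ⟨p, q, hpq, hp⟩ := first_h_split cs.reverse (by simpa using h)
  refine ⟨q.reverse, p.reverse, ?_, by simpa using hp⟩
  have := congrArg List.reverse hpq
  simpa using this

-- ---- A-side: the two loops ----

theorem pyGet?_mem {α : Type} (l : List α) (i : Int) (c : α) (h : PySem.List.pyGet? l i = some c) :
    c ∈ l := by
  unfold PySem.List.pyGet? at h
  cases hk : PySem.List.pyIdx? l.length i with
  | none => rw [hk] at h; simp at h
  | some k => rw [hk] at h; simp at h; exact List.mem_of_getElem? h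

theorem loopFirst_no (cs : List Char) (steps : List Int) (h : 'h' ∉ cs) :
    sortLineLoopFirst cs steps 0 = 0 := by
  induction steps with
  | nil => rfl
  | cons step rest ih =>
    rw [sortLineLoopFirst, if_neg, ih]
    exact fun hc => h (pyGet?_mem _ _ _ hc)

theorem loopLast_no (cs : List Char) (steps : List Int) (h : 'h' ∉ cs) :
    sortLineLoopLast cs steps 0 = 0 := by
  induction steps with
  | nil => rfl
  | cons step rest ih =>
    rw [sortLineLoopLast, if_neg, ih]
    exact fun hc => h (pyGet?_mem _ _ _ hc)

theorem drop_head (cs : List Char) (k : Nat) (c : Char) (r : List Char) (hd : cs.drop k = c :: r) :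
    cs[k]? = some c ∧ k < cs.length := by
  have h0 : (cs.drop k)[0]? = some c := by rw [hd]; rfl
  rw [List.getElem?_drop] at h0
  simp only [Nat.add_zero] at h0
  exact ⟨h0, (List.getElem?_eq_some_iff.mp h0).1⟩

theorem loopFirst_found (cs : List Char) (p : List Char) : ∀ (q : List Char) (k : Nat),
    cs.drop k = p ++ 'h' :: q → 'h' ∉ p →
    sortLineLoopFirst cs (PySem.List.pyRange (k : Int) (cs.length : Int)) 0 = (k : Int) + p.length := by
  induction p with
  | nil =>
    intro q k hd _
    obtain ⟨hget, hk⟩ := drop_head cs k 'h' q hd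
    rw [PySem.List.pyRange_one_cons (by exact_mod_cast hk), sortLineLoopFirst,
      if_pos (by rw [PySem.List.pyGet?_natCast]; exact hget)]
    simp
  | cons c p' ih =>
    intro q k hd hp
    obtain ⟨hget, hk⟩ := drop_head cs k c (p' ++ 'h' :: q) (by simpa using hd)
    have hc : c ≠ 'h' := fun hc => hp (by simp [hc])
    rw [PySem.List.pyRange_one_cons (by exact_mod_cast hk), sortLineLoopFirst,
      if_neg (by rw [PySem.List.pyGet?_natCast, hget]; simp [hc])]
    have hd' : cs.drop (k + 1) = p' ++ 'h' :: q := by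
      rw [← List.tail_drop, hd]; rfl
    have := ih q (k + 1) hd' (fun hm => hp (by simp [hm]))
    rw [show ((k : Int) + 1) = ((k + 1 : Nat) : Int) by push_cast; ring, this]
    push_cast [List.length_cons]; ring

theorem pyGet?_neg_rev (cs : List Char) (k : Nat) (hk : k < cs.length) :
    PySem.List.pyGet? cs (-((k : Int) + 1)) = cs.reverse[k]? := by
  have h1 : PySem.List.pyGet? cs (-((k : Int) + 1)) = cs[cs.length - 1 - k]? := by
    simp only [PySem.List.pyGet?, PySem.List.pyIdx?]
    simp only [if_neg (by omega : ¬ (0 : Int) ≤ -((k : Int) + 1))]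
    have h2 : (- -((k : Int) + 1)).toNat = k + 1 := by omega
    rw [h2, if_pos (by omega : -((cs.length : Int)) ≤ -((k : Int) + 1))]
    simp only [Option.bind_some]
    congr 1
    omega
  rw [h1, List.getElem?_reverse hk]

theorem loopLast_found (cs : List Char) (p : List Char) : ∀ (q : List Char) (k : Nat),
    cs.reverse.drop k = p ++ 'h' :: q → 'h' ∉ p →
    sortLineLoopLast cs (PySem.List.pyRange ((k : Int) + 1) ((cs.length : Int) + 1)) 0
      = (cs.length : Int) - ((k : Int) + p.length + 1) - 1 := by
  induction p with
  | nil =>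
    intro q k hd _
    obtain ⟨hget, hk⟩ := drop_head cs.reverse k 'h' q hd
    rw [List.length_reverse] at hk
    rw [PySem.List.pyRange_one_cons (by exact_mod_cast (by omega : k + 1 < cs.length + 1)), sortLineLoopLast,
      if_pos (by rw [pyGet?_neg_rev cs k hk]; exact hget)]
    simp
  | cons c p' ih =>
    intro q k hd hp
    obtain ⟨hget, hk⟩ := drop_head cs.reverse k c (p' ++ 'h' :: q) (by simpa using hd)
    rw [List.length_reverse] at hk
    have hc : c ≠ 'h' := fun hc => hp (by simp [hc])
    rw [PySem.List.pyRange_one_cons (by exact_mod_cast (by omega : k + 1 < cs.length + 1)), sortLineLoopLast,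
      if_neg (by rw [pyGet?_neg_rev cs k hk, hget]; simp [hc])]
    have hd' : cs.reverse.drop (k + 1) = p' ++ 'h' :: q := by
      rw [← List.tail_drop, hd]; rfl
    have := ih q (k + 1) hd' (fun hm => hp (by simp [hm]))
    rw [show ((k : Int) + 1 + 1) = ((k + 1 : Nat) : Int) + 1 by push_cast; ring, this]
    push_cast [List.length_cons]; ring

-- ---- A-side: the negative-step slice ----

-- the filterMap at the heart of slice? with step -1: indices s0, s0-1, ..., s0-c+1
theorem filterMap_desc (cs : List Char) (c : Nat) : ∀ (s0 : Nat), s0 < cs.length → c ≤ s0 + 1 →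
    List.filterMap (fun k : Nat => cs[((s0 : Int) + -1 * (k : Int)).toNat]?) (List.range c)
      = ((cs.drop (s0 + 1 - c)).take c).reverse := by
  induction c with
  | zero => intro s0 _ _; simp
  | succ c ih =>
    intro s0 hs hc
    rw [List.range_succ, List.filterMap_append, ih s0 hs (by omega)]
    have ht : ((s0 : Int) + -1 * (c : Int)).toNat = s0 - c := by omega
    have hlt : s0 - c < cs.length := by omega
    have hone : List.filterMap (fun k : Nat => cs[((s0 : Int) + -1 * (k : Int)).toNat]?) [c]
        = [cs[s0 - c]] := by
      simp only [List.filterMap_cons, List.filterMap_nil, ht, List.getElem?_eq_getElem hlt]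
    rw [hone]
    have hdrop : cs.drop (s0 - c) = cs[s0 - c] :: cs.drop (s0 - c + 1) :=
      (List.getElem_cons_drop hlt).symm
    have h1 : s0 + 1 - (c + 1) = s0 - c := by omega
    have h2 : s0 - c + 1 = s0 + 1 - c := by omega
    rw [h1, hdrop, List.take_succ_cons, List.reverse_cons, h2]

theorem slice_zero_zero (cs : List Char) :
    PySem.List.slice? cs (some 0) (some 0) (-1) = some [] := by
  simp only [PySem.List.slice?, PySem.List.sliceIndices]
  norm_num

theorem slice_neg_one_main (cs : List Char) (f l : Nat) (hl1 : 1 ≤ l) (hln : l < cs.length) (hfl : f ≤ l) :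
    PySem.List.slice? cs (some ((l : Int) - 1)) (some (f : Int)) (-1)
      = some (((cs.drop (f + 1)).take (l - f - 1)).reverse) := by
  simp only [PySem.List.slice?, PySem.List.sliceIndices]
  rw [if_neg (by norm_num)]
  simp only [if_pos (by norm_num : (-1 : Int) < 0)]
  rw [if_neg (by omega : ¬ ((l : Int) - 1 < 0)), if_neg (by omega : ¬ ((f : Int) < 0))]
  rw [min_eq_left (by omega : (l : Int) - 1 ≤ (cs.length : Int) - 1),
      min_eq_left (by omega : (f : Int) ≤ (cs.length : Int) - 1)]
  rw [if_neg (by norm_num : ¬ ((0:Int) < -1))]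
  by_cases hc : (f : Int) < (l : Int) - 1
  · rw [if_pos hc]
    have hcnt : (((l : Int) - 1 - (f : Int) + - -1 - 1) / - -1).toNat = l - 1 - f := by
      simp only [neg_neg]
      omega
    rw [hcnt]
    have hcast : ((l : Int) - 1) = ((l - 1 : Nat) : Int) := by omega
    simp only [hcast]
    rw [filterMap_desc cs (l - 1 - f) (l - 1) (by omega) (by omega)]
    have e1 : l - 1 + 1 - (l - 1 - f) = f + 1 := by omega
    have e2 : l - 1 - f = l - f - 1 := by omega
    rw [e1, e2]
  · rw [if_neg hc]
    have h0 : l - f - 1 = 0 := by omega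
    simp [h0]

theorem slice_wrap (cs : List Char) (h2 : 2 ≤ cs.length) :
    PySem.List.slice? cs (some (-1)) (some 0) (-1) = some cs.tail.reverse := by
  simp only [PySem.List.slice?, PySem.List.sliceIndices]
  norm_num
  rw [min_eq_left (by omega : (0 : Int) ≤ (cs.length : Int) - 1)]
  rw [if_pos (by omega : (1 : Int) + 0 < (cs.length : Int))]
  have hcnt : ((-1 : Int) + (cs.length : Int) - 0).toNat = cs.length - 1 := by omega
  rw [hcnt]
  have hd := filterMap_desc cs (cs.length - 1) (cs.length - 1) (by omega) (by omega)
  simp only [neg_one_mul] at hd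
  have hcast : ((-1 : Int) + (cs.length : Int)) = (((cs.length - 1 : Nat)) : Int) := by omega
  simp only [hcast]
  rw [hd]
  have e1 : cs.length - 1 + 1 - (cs.length - 1) = 1 := by omega
  rw [e1, List.drop_one]
  congr 1
  exact List.take_of_length_le (by simp)

-- ---- B-side: splitOn ----

theorem go_zero (l cur : List Char) (acc : List (List Char)) :
    PySem.Chars.splitOn.go ['h'] 0 l cur acc = ((cur.reverse ++ l) :: acc).reverse := by
  rw [PySem.Chars.splitOn.go]

theorem go_nil (fuel : Nat) (cur : List Char) (acc : List (List Char)) :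
    PySem.Chars.splitOn.go ['h'] (fuel + 1) [] cur acc = (cur.reverse :: acc).reverse := by
  rw [PySem.Chars.splitOn.go]; omega

theorem go_cons_h (fuel : Nat) (rest cur : List Char) (acc : List (List Char)) :
    PySem.Chars.splitOn.go ['h'] (fuel + 1) ('h' :: rest) cur acc
      = PySem.Chars.splitOn.go ['h'] fuel rest [] (cur.reverse :: acc) := by
  rw [PySem.Chars.splitOn.go]
  have : List.isPrefixOf ['h'] ('h' :: rest) = ('h' == 'h' && List.isPrefixOf ([] : List Char) rest) := rfl
  rw [this, List.isPrefixOf_nil_left, Bool.and_true]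
  simp

theorem go_cons_ne (fuel : Nat) (c : Char) (rest cur : List Char) (acc : List (List Char)) (h : c ≠ 'h') :
    PySem.Chars.splitOn.go ['h'] (fuel + 1) (c :: rest) cur acc
      = PySem.Chars.splitOn.go ['h'] fuel rest (c :: cur) acc := by
  rw [PySem.Chars.splitOn.go]
  have : List.isPrefixOf ['h'] (c :: rest) = ('h' == c && List.isPrefixOf ([] : List Char) rest) := rfl
  rw [this, List.isPrefixOf_nil_left, Bool.and_true, if_neg]
  simp only [beq_iff_eq]
  exact fun hc => h hc.symm

theorem go_no_h (fuel : Nat) : ∀ (l cur : List Char) (acc : List (List Char)), 'h' ∉ l →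
    PySem.Chars.splitOn.go ['h'] fuel l cur acc = ((cur.reverse ++ l) :: acc).reverse := by
  induction fuel with
  | zero => intro l cur acc _; exact go_zero l cur acc
  | succ fuel ih =>
    intro l cur acc h
    cases l with
    | nil => rw [go_nil]; simp
    | cons c rest =>
      have hc : c ≠ 'h' := fun hc => h (by simp [hc])
      rw [go_cons_ne fuel c rest cur acc hc, ih rest (c :: cur) acc (fun hm => h (by simp [hm]))]
      simp

theorem go_acc (fuel : Nat) : ∀ (l cur : List Char) (acc : List (List Char)),
    PySem.Chars.splitOn.go ['h'] fuel l cur acc = acc.reverse ++ PySem.Chars.splitOn.go ['h'] fuel l cur [] := by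
  induction fuel with
  | zero => intro l cur acc; rw [go_zero, go_zero]; simp
  | succ fuel ih =>
    intro l cur acc
    cases l with
    | nil => rw [go_nil, go_nil]; simp
    | cons c rest =>
      by_cases hc : c = 'h'
      · subst hc
        rw [go_cons_h, go_cons_h, ih rest [] (cur.reverse :: acc), ih rest [] [cur.reverse]]
        simp
      · rw [go_cons_ne fuel c rest cur acc hc, go_cons_ne fuel c rest cur [] hc, ih rest (c :: cur) acc]

theorem go_first (p : List Char) : ∀ (fuel : Nat) (q cur : List Char) (acc : List (List Char)), 'h' ∉ p →
    PySem.Chars.splitOn.go ['h'] (p.length + 1 + fuel) (p ++ 'h' :: q) cur acc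
      = PySem.Chars.splitOn.go ['h'] fuel q [] ((cur.reverse ++ p) :: acc) := by
  induction p with
  | nil =>
    intro fuel q cur acc _
    have e : ([] : List Char).length + 1 + fuel = fuel + 1 := by
      show 0 + 1 + fuel = fuel + 1; omega
    rw [e]
    simpa using go_cons_h fuel q cur acc
  | cons c p' ih =>
    intro fuel q cur acc hp
    have hc : c ≠ 'h' := fun hc => hp (by simp [hc])
    have e : (c :: p').length + 1 + fuel = (p'.length + 1 + fuel) + 1 := by
      show p'.length + 1 + 1 + fuel = p'.length + 1 + fuel + 1; omega
    rw [e]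
    have := go_cons_ne (p'.length + 1 + fuel) c (p' ++ 'h' :: q) cur acc hc
    simp only [List.cons_append] at this ⊢
    rw [this, ih fuel q (c :: cur) acc (fun hm => hp (by simp [hm]))]
    simp

theorem splitOn_no_h (s : List Char) (h : 'h' ∉ s) : PySem.Chars.splitOn s ['h'] = [s] := by
  rw [PySem.Chars.splitOn, go_no_h _ s [] [] h]
  simp

theorem splitOn_first (p q : List Char) (hp : 'h' ∉ p) :
    PySem.Chars.splitOn (p ++ 'h' :: q) ['h'] = p :: PySem.Chars.splitOn q ['h'] := by
  rw [PySem.Chars.splitOn]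
  have e : (p ++ 'h' :: q).length + 1 = p.length + 1 + (q.length + 1) := by
    rw [List.length_append, List.length_cons]; omega
  rw [e, go_first p (q.length + 1) q [] [] hp, go_acc]
  rw [PySem.Chars.splitOn]
  simp

theorem splitOn_ne_nil (s : List Char) : PySem.Chars.splitOn s ['h'] ≠ [] := by
  by_cases h : 'h' ∈ s
  · obtain ⟨p, q, hpq, hp⟩ := first_h_split s h
    rw [hpq, splitOn_first p q hp]
    simp
  · rw [splitOn_no_h s h]
    simp

theorem splitOn_last_aux (n : Nat) : ∀ (m t : List Char), m.length ≤ n → 'h' ∉ t →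
    PySem.Chars.splitOn (m ++ 'h' :: t) ['h'] = PySem.Chars.splitOn m ['h'] ++ [t] := by
  induction n with
  | zero =>
    intro m t hm ht
    have : m = [] := List.eq_nil_of_length_eq_zero (by omega)
    subst this
    rw [splitOn_first [] t (by simp), splitOn_no_h t ht, splitOn_no_h [] (by simp)]
    rfl
  | succ n ih =>
    intro m t hm ht
    by_cases h : 'h' ∈ m
    · obtain ⟨p, q, hpq, hp⟩ := first_h_split m h
      subst hpq
      have e : (p ++ 'h' :: q) ++ 'h' :: t = p ++ 'h' :: (q ++ 'h' :: t) := by simp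
      rw [e, splitOn_first p _ hp, splitOn_first p q hp,
        ih q t (by rw [List.length_append, List.length_cons] at hm; omega) ht]
      rfl
    · rw [splitOn_first m t h, splitOn_no_h m h, splitOn_no_h t ht]
      rfl

theorem splitOn_last (m t : List Char) (ht : 'h' ∉ t) :
    PySem.Chars.splitOn (m ++ 'h' :: t) ['h'] = PySem.Chars.splitOn m ['h'] ++ [t] :=
  splitOn_last_aux m.length m t le_rfl ht

theorem join_cons_cons (a b : List Char) (l : List (List Char)) :
    PySem.Chars.join ['h'] (a :: b :: l) = a ++ 'h' :: PySem.Chars.join ['h'] (b :: l) := by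
  simp [PySem.Chars.join, List.intercalate, List.intersperse]

theorem join_splitOn_aux (n : Nat) : ∀ (s : List Char), s.length ≤ n →
    PySem.Chars.join ['h'] (PySem.Chars.splitOn s ['h']) = s := by
  induction n with
  | zero =>
    intro s hs
    have : s = [] := List.eq_nil_of_length_eq_zero (by omega)
    subst this
    rw [splitOn_no_h [] (by simp)]
    simp [PySem.Chars.join, List.intercalate]
  | succ n ih =>
    intro s hs
    by_cases h : 'h' ∈ s
    · obtain ⟨p, q, hpq, hp⟩ := first_h_split s h
      subst hpq
      rw [splitOn_first p q hp]
      obtain ⟨b, l', hbl⟩ := List.exists_cons_of_ne_nil (splitOn_ne_nil q)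
      rw [hbl, join_cons_cons, ← hbl,
        ih q (by rw [List.length_append, List.length_cons] at hs; omega)]
    · rw [splitOn_no_h s h]
      simp [PySem.Chars.join, List.intercalate]

theorem join_splitOn (s : List Char) :
    PySem.Chars.join ['h'] (PySem.Chars.splitOn s ['h']) = s :=
  join_splitOn_aux s.length s le_rfl

theorem slice_one_negone {α : Type} (l : List α) :
    PySem.List.slice l (some 1) (some (-1)) = l.tail.dropLast := by
  simp only [PySem.List.slice, PySem.List.clampIdx]
  norm_num
  cases l with
  | nil => simp
  | cons a l' =>
    rw [if_neg (by simp)]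
    have h1 : min 1 (a :: l').length = 1 := by simp
    have h2 : (((a :: l').length : Int) + -1).toNat = l'.length := by
      rw [List.length_cons]; omega
    rw [h1, h2, List.drop_one, List.tail_cons, List.dropLast_eq_take]

-- B's core value as tail/dropLast of the parts
theorem alt_eq (line : String) :
    sort_line_alt line
      = String.ofList (PySem.Chars.join ['h'] ((PySem.Chars.splitOn line.toList ['h']).tail.dropLast)).reverse := by
  rw [sort_line_alt, slice_one_negone]

-- A unfolded, with the `let`s substituted
theorem srt_eq (line : String) :
    sort_line line = String.ofList ((PySem.List.slice? line.toList
      (some (sortLineLoopLast line.toList (PySem.List.pyRange 1 ((line.toList.length : Int) + 1)) 0))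
      (some (sortLineLoopFirst line.toList (PySem.List.pyRange 0 (line.toList.length : Int)) 0))
      (-1)).getD []) := rfl

-- both cores, cs containing no 'h'
theorem main_no_h (line : String) (h : 'h' ∉ line.toList) :
    sort_line line = sort_line_alt line := by
  rw [srt_eq, alt_eq, loopFirst_no _ _ h, loopLast_no _ _ h, slice_zero_zero,
    splitOn_no_h _ h]
  simp

-- the generic 'h'-containing case, written over an explicit decomposition of the string
theorem main_two_h (line : String) (p m' t : List Char) (hsplit : line.toList = p ++ 'h' :: (m' ++ 'h' :: t))
    (hp : 'h' ∉ p) (ht : 'h' ∉ t) :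
    sort_line line = sort_line_alt line := by
  rw [srt_eq, alt_eq]
  have hF := loopFirst_found line.toList p (m' ++ 'h' :: t) 0 (by simpa using hsplit) hp
  have hrev : line.toList.reverse.drop 0 = t.reverse ++ 'h' :: (m'.reverse ++ 'h' :: p.reverse) := by
    rw [List.drop_zero, hsplit]
    simp
  have hL := loopLast_found line.toList t.reverse (m'.reverse ++ 'h' :: p.reverse) 0 hrev
    (by simpa using ht)
  simp only [Nat.cast_zero, zero_add] at hF hL
  have hn : line.toList.length = p.length + 1 + (m'.length + 1 + t.length) := by
    rw [hsplit]; simp; omega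
  rw [hF, hL]
  have ecast : (line.toList.length : Int) - ((t.reverse.length : Int) + 1) - 1
      = (((p.length + 1 + m'.length : Nat)) : Int) - 1 := by
    rw [List.length_reverse]; push_cast [hn]; ring
  rw [ecast, slice_neg_one_main line.toList p.length (p.length + 1 + m'.length)
    (by omega) (by omega : p.length + 1 + m'.length < line.toList.length) (by omega)]
  have ed : line.toList.drop (p.length + 1) = m' ++ 'h' :: t := by
    rw [hsplit, show p ++ 'h' :: (m' ++ 'h' :: t) = (p ++ ['h']) ++ (m' ++ 'h' :: t) by simp]
    exact List.drop_left' (by simp)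
  have etk : p.length + 1 + m'.length - p.length - 1 = m'.length := by omega
  rw [ed, etk, List.take_left' rfl]
  rw [hsplit, splitOn_first p _ hp, List.tail_cons, splitOn_last m' t ht,
    List.dropLast_concat, join_splitOn]
  rfl

-- exactly one 'h' in the string
theorem main_one_h (line : String) (p q : List Char) (hsplit : line.toList = p ++ 'h' :: q)
    (hp : 'h' ∉ p) (hq : 'h' ∉ q) (hD : ¬ D_sort_line line) :
    sort_line line = sort_line_alt line := by
  rw [srt_eq, alt_eq]
  have hF := loopFirst_found line.toList p q 0 (by simpa using hsplit) hp
  have hrev : line.toList.reverse.drop 0 = q.reverse ++ 'h' :: p.reverse := by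
    rw [List.drop_zero, hsplit]; simp
  have hL := loopLast_found line.toList q.reverse p.reverse 0 hrev (by simpa using hq)
  simp only [Nat.cast_zero, zero_add] at hF hL
  have hn : line.toList.length = p.length + 1 + q.length := by
    rw [hsplit]; simp; omega
  rw [hF, hL]
  have hB : PySem.Chars.join ['h'] ((PySem.Chars.splitOn line.toList ['h']).tail.dropLast) = [] := by
    rw [hsplit, splitOn_first p q hp, List.tail_cons, splitOn_no_h q hq]
    simp [PySem.Chars.join, List.intercalate]
  rw [hB]
  cases p with
  | cons c p'' =>
    have ecast : (line.toList.length : Int) - ((q.reverse.length : Int) + 1) - 1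
        = (((c :: p'').length : Nat) : Int) - 1 := by
      rw [List.length_reverse]; push_cast [hn]; ring
    rw [ecast, slice_neg_one_main line.toList (c :: p'').length (c :: p'').length
      (by simp) (by omega) le_rfl]
    simp
  | nil =>
    cases q with
    | nil =>
      -- line is exactly "h"
      have h1 : line.toList = ['h'] := by simpa using hsplit
      rw [h1]
      rfl
    | cons b q'' =>
      -- the only 'h' is the first character and the string is longer: that is D_
      have hDD : D_sort_line line := by
        unfold D_sort_line
        rw [hsplit]
        refine ⟨by simp, by simp, by simpa using hq⟩
      exact absurd hDD hD

theorem sort_line_spec : Claim_unchanged_sort_line := by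
  unfold Claim_unchanged_sort_line
  intro line _
  unfold Spec_sort_line
  intro hD
  by_cases hmem : 'h' ∈ line.toList
  · obtain ⟨p, q, hpq, hp⟩ := first_h_split line.toList hmem
    by_cases hq : 'h' ∈ q
    · obtain ⟨m', t, hmt, ht⟩ := last_h_split q hq
      exact main_two_h line p m' t (by rw [hpq, hmt]) hp ht
    · exact main_one_h line p q hpq hp hq hD
  · exact main_no_h line hmem

theorem sort_line_changed : Claim_changed_sort_line := by
  unfold Claim_changed_sort_line; decide

theorem sort_line_tight : Claim_exact_sort_line := by
  unfold Claim_exact_sort_line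
  intro line _ hD
  obtain ⟨hlen, hhead, htail⟩ := hD
  have hsplit : line.toList = 'h' :: line.toList.tail := (List.cons_head?_tail hhead).symm
  have hF := loopFirst_found line.toList [] line.toList.tail 0 (by simpa using hsplit) (by simp)
  have hrev : line.toList.reverse.drop 0 = line.toList.tail.reverse ++ 'h' :: ([] : List Char) := by
    rw [List.drop_zero]
    conv_lhs => rw [hsplit]
    simp
  have hL := loopLast_found line.toList line.toList.tail.reverse [] 0 hrev (by simpa using htail)
  simp only [Nat.cast_zero, zero_add] at hF hL
  have hn : line.toList.length = line.toList.tail.length + 1 := by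
    conv_lhs => rw [hsplit]
    simp
  have ecast : (line.toList.length : Int) - ((line.toList.tail.reverse.length : Int) + 1) - 1
      = -1 := by
    rw [List.length_reverse]; push_cast [hn]; ring
  have hA : sort_line line = String.ofList line.toList.tail.reverse := by
    rw [srt_eq, hF, hL, ecast,
      show (([] : List Char).length : Int) = 0 by rfl, slice_wrap line.toList hlen]
    rfl
  have hB : sort_line_alt line = String.ofList [] := by
    rw [alt_eq]
    conv_lhs => rw [hsplit]
    rw [show ('h' :: line.toList.tail) = [] ++ 'h' :: line.toList.tail by rfl,
      splitOn_first [] line.toList.tail (by simp), List.tail_cons, splitOn_no_h _ htail]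
    simp [PySem.Chars.join, List.intercalate]
  rw [hA, hB]
  intro heq
  have h2 := congrArg String.toList heq
  simp only [String.toList_ofList] at h2
  have : line.toList.tail.length = 0 := by
    rw [← List.length_reverse, h2]; rfl
  omega
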